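-- pv_equiv track=rewrite | github.com/HelloEgg/math_ai | app.py | extract_json_from_response
-- ===== SOURCE A (Python) =====
-- def fix_latex_escaping(text):
--     """
--     Fix LaTeX backslash escaping in JSON strings.
--     Gemini often returns unescaped LaTeX like \\frac which breaks JSON parsing.
--
--     In JSON, valid escape sequences are: \\", \\\\, \\/, \\b, \\f, \\n, \\r, \\t, \\uXXXX
--     Any other backslash followed by a character is invalid and needs to be escaped.
--     """
--     # Process character by character to handle mixed escaping
--     result = []
--     i = 0
--     while i < len(text):
--         if text[i] == '\\':
--             if i + 1 < len(text):
--                 next_char = text[i + 1]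
--                 # Check if already escaped (double backslash)
--                 if next_char == '\\':
--                     # Already escaped, keep both
--                     result.append('\\\\')
--                     i += 2
--                     continue
--                 # Check if it's a valid JSON escape
--                 elif next_char in '"\/bfnrtu':
--                     # Valid JSON escape, keep as is
--                     result.append('\\')
--                     result.append(next_char)
--                     i += 2
--                     continue
--                 else:
--                     # Invalid escape (like \frac, \(, etc.), add extra backslash
--                     result.append('\\\\')
--                     result.append(next_char)
--                     i += 2
--                     continue
--             else:
--                 # Trailing backslash, keep it
--                 result.append('\\')
--                 i += 1
--         else:
--             result.append(text[i])
--             i += 1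
--
--     return ''.join(result)
--
-- def extract_json_from_response(response_text):
--     """Extract JSON from response, handling markdown code blocks."""
--     response_text = response_text.strip()
--     if response_text.startswith('```'):
--         lines = response_text.split('\n')
--         json_lines = []
--         in_json = False
--         for line in lines:
--             if line.startswith('```') and not in_json:
--                 in_json = True
--                 continue
--             elif line.startswith('```') and in_json:
--                 break
--             elif in_json:
--                 json_lines.append(line)
--         response_text = '\n'.join(json_lines)
--
--     # Fix LaTeX escaping issues
--     response_text = fix_latex_escaping(response_text)
--
--     return response_text
-- ===== SOURCE B (Python) =====
-- import re
-- from itertools import takewhile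
--
-- _VALID = '\\"/bfnrtu'
--
--
-- def _repl(m):
--     c = m.group(1)
--     return ('\\' + c) if c in _VALID else ('\\\\' + c)
--
--
-- def fix_latex_escaping(text):
--     # Non-overlapping left-to-right substitution: each backslash+char pair is
--     # rewritten once; a trailing lone backslash never matches and is kept.
--     return re.sub(r'\\(.)', _repl, text, flags=re.DOTALL)
--
--
-- def extract_json_from_response(response_text):
--     """Extract JSON from response, handling markdown code blocks."""
--     t = response_text.strip()
--     if t.startswith('```'):
--         body = t.split('\n')[1:]
--         t = '\n'.join(takewhile(lambda l: not l.startswith('```'), body))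
--     return fix_latex_escaping(t)
-- ===== Notes on version B (the rewrite author's own statement) =====
-- stated objective: idiomatic
-- what changed: fix_latex_escaping's manual index-advancing while-loop with explicit lookahead branches is replaced by a single non-overlapping regex substitution whose replacement classifies the escaped character by membership in the valid-escape set (the double-backslash branch merges into that membership test), and the fence-stripping flag loop is replaced by dropping the first line plus takewhile up to the closing fence.
import Mathlib
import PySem

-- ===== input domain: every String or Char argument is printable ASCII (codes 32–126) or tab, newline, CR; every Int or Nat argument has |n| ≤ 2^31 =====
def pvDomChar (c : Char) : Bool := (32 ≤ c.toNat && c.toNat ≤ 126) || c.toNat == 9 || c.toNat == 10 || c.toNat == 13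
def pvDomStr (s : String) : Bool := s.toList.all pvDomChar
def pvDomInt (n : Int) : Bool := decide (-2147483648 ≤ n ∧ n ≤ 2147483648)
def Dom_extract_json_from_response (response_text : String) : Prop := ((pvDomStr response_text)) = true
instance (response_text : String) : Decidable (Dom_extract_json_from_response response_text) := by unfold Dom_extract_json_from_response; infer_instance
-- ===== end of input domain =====

-- B: fix_latex_escaping as one non-overlapping regex substitution (ported by hand as a
-- left-to-right two-character scan, exact for re.sub of r'\\(.)' with DOTALL) and the
-- fence-stripping flag loop as drop-first-line + takewhile; objective: idiomatic.


-- ===== PORT A =====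
-- fix_latex_escaping: the index-advancing while-loop, one step per iteration
-- (i += 2 on a backslash with a following character, i += 1 otherwise).
def pvFixA : List Char → List Char
  | [] => []
  | c :: rest =>
    if c = '\\' then
      match rest with
      | [] => ['\\']                                   -- trailing backslash, keep it
      | next :: rest' =>
        if next = '\\' then '\\' :: '\\' :: pvFixA rest'            -- already escaped
        else if next ∈ ['"', '/', 'b', 'f', 'n', 'r', 't', 'u'] then
          '\\' :: next :: pvFixA rest'                              -- valid JSON escape
        else '\\' :: '\\' :: next :: pvFixA rest'                   -- invalid escape
    else c :: pvFixA rest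

-- the for-loop over lines with the in_json flag (continue / break / append)
def pvFenceLoopA : List (List Char) → Bool → List (List Char)
  | [], _ => []
  | line :: ls, inj =>
    if PySem.Chars.startswith line ['`', '`', '`'] && !inj then pvFenceLoopA ls true
    else if PySem.Chars.startswith line ['`', '`', '`'] && inj then []
    else if inj then line :: pvFenceLoopA ls inj
    else pvFenceLoopA ls inj

def extract_json_from_response (response_text : String) : String :=
  let t := PySem.Chars.strip response_text.toList
  let t := if PySem.Chars.startswith t ['`', '`', '`'] then
      PySem.Chars.join ['\n'] (pvFenceLoopA (PySem.Chars.splitOn t ['\n']) false)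
    else t
  String.ofList (pvFixA t)

-- ===== PORT B =====
-- Hand port of re.sub(r'\\(.)', _repl, text, flags=re.DOTALL): exact because re.sub
-- rewrites non-overlapping matches left to right (so this is a left scan consuming two
-- characters per match) and a trailing lone backslash matches nothing, hence stays.
def pvFixB : List Char → List Char
  | '\\' :: c :: rest =>
    (if c ∈ ['\\', '"', '/', 'b', 'f', 'n', 'r', 't', 'u'] then ['\\', c]
     else ['\\', '\\', c]) ++ pvFixB rest
  | c :: rest => c :: pvFixB rest
  | [] => []

def extract_json_from_response_alt (response_text : String) : String :=
  let t := PySem.Chars.strip response_text.toList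
  let t := if PySem.Chars.startswith t ['`', '`', '`'] then
      PySem.Chars.join ['\n']
        (((PySem.Chars.splitOn t ['\n']).drop 1).takeWhile
          (fun l => !PySem.Chars.startswith l ['`', '`', '`']))
    else t
  String.ofList (pvFixB t)

-- ===== PRECONDITION & SPEC =====
def Spec_extract_json_from_response (response_text : String) (out : String) : Prop := out = extract_json_from_response_alt response_text
instance (response_text : String) (out : String) : Decidable (Spec_extract_json_from_response response_text out) := by unfold Spec_extract_json_from_response; infer_instance

-- ===== CLAIM (what is proved, stated in full; the proofs are below) =====
def Claim_equal_extract_json_from_response : Prop := ∀ (response_text : String), Dom_extract_json_from_response response_text → Spec_extract_json_from_response response_text (extract_json_from_response response_text)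

-- ===== LEMMAS AND PROOFS =====

theorem pvFix_eq (l : List Char) : pvFixA l = pvFixB l := by
  induction l using pvFixA.induct with
  | case6 next rest' h ih => rw [pvFixA.eq_def]; simp [h, ih, pvFixB]
  | _ => simp_all [pvFixA, pvFixB]

theorem pvFenceLoopA_true (ls : List (List Char)) :
    pvFenceLoopA ls true = ls.takeWhile (fun l => !PySem.Chars.startswith l ['`', '`', '`']) := by
  induction ls with
  | nil => rfl
  | cons line ls ih =>
    by_cases h : PySem.Chars.startswith line ['`', '`', '`'] = true <;>
      simp [pvFenceLoopA, h, List.takeWhile, ih]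

theorem pvGoAcc (sep : List Char) (fuel : Nat) :
    ∀ (l cur acc : List Char) (accs : List (List Char)),
      PySem.Chars.splitOn.go sep fuel l cur (acc :: accs) =
        accs.reverse ++ acc :: PySem.Chars.splitOn.go sep fuel l cur [] := by
  induction fuel with
  | zero => intro l cur acc accs; simp [PySem.Chars.splitOn.go]
  | succ n ih =>
    intro l cur acc accs
    cases l with
    | nil => simp [PySem.Chars.splitOn.go]
    | cons c rest =>
      simp only [PySem.Chars.splitOn.go]
      split_ifs with h
      · rw [ih, ih (List.drop sep.length (c :: rest)) [] cur.reverse []]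
        simp
      · exact ih rest (c :: cur) acc accs

theorem pvGoHead (fuel : Nat) :
    ∀ (l cur : List Char), ∃ pre rest,
      PySem.Chars.splitOn.go ['\n'] fuel l cur [] = (cur.reverse ++ pre) :: rest := by
  induction fuel with
  | zero => intro l cur; exact ⟨l, [], by simp [PySem.Chars.splitOn.go]⟩
  | succ n ih =>
    intro l cur
    cases l with
    | nil => exact ⟨[], [], by simp [PySem.Chars.splitOn.go]⟩
    | cons c rest =>
      by_cases h : List.isPrefixOf ['\n'] (c :: rest) = true
      · refine ⟨[], PySem.Chars.splitOn.go ['\n'] n (List.drop 1 (c :: rest)) [] [], ?_⟩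
        simp only [PySem.Chars.splitOn.go, h, if_true]
        rw [pvGoAcc]
        simp
      · obtain ⟨pre, r, hp⟩ := ih rest (c :: cur)
        refine ⟨c :: pre, r, ?_⟩
        simp only [PySem.Chars.splitOn.go, h]
        rw [hp]
        simp

theorem pvSplit_head (t : List Char) (h : PySem.Chars.startswith t ['`', '`', '`'] = true) :
    ∃ hd rest, PySem.Chars.splitOn t ['\n'] = hd :: rest ∧
      PySem.Chars.startswith hd ['`', '`', '`'] = true := by
  rw [PySem.Chars.startswith_iff] at h
  obtain ⟨t', rfl⟩ := h
  obtain ⟨pre, r, hp⟩ := pvGoHead (t'.length + 1) t' ['`', '`', '`']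
  refine ⟨['`', '`', '`'] ++ pre, r, ?_, ?_⟩
  · show PySem.Chars.splitOn.go _ _ _ _ _ = _
    simp only [List.cons_append, List.length_cons, List.nil_append]
    simp only [PySem.Chars.splitOn.go, List.isPrefixOf]
    rw [if_neg (by decide), if_neg (by decide), if_neg (by decide), hp]
    rfl
  · rw [PySem.Chars.startswith_iff]
    exact ⟨pre, rfl⟩

-- ===== VERDICT (by name: the statement is the Claim_ definition above) =====
theorem extract_json_from_response_spec : Claim_equal_extract_json_from_response := by
  intro s _
  unfold Spec_extract_json_from_response extract_json_from_response extract_json_from_response_alt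
  by_cases h : PySem.Chars.startswith (PySem.Chars.strip s.toList) ['`', '`', '`'] = true
  · obtain ⟨hd, rest, hs, hhd⟩ := pvSplit_head _ h
    simp [h, hs, pvFenceLoopA, hhd, pvFenceLoopA_true, pvFix_eq]
  · simp [h, pvFix_eq]
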